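-- pv_equiv track=rewrite | github.com/jbarrera30/Sandcastle-Model | Sandcastles_v5.py | shapeCastle
-- ===== SOURCE A (Python) =====
-- def shapeCastle(base,h,shape):
--
--     if(shape=="rectangular"):
--         pass
--     if(shape=="rhombus"):
--         pass
--
--     if(shape=="pyramid"):
--         h=h-1
--         for i in range(0,len(base)):
--             for j in range(0,len(base[0])):
--                 base[h][j]= 0
--                 base[len(base)-1-h][j]=0
--                 base[i][h]=0
--                 base[i][len(base[0])-1-h]=0
--
--     return base
-- ===== SOURCE B (Python) =====
-- def shapeCastle(base, h, shape):
--     # B rebuilds and returns a NEW grid (A mutates `base` in place); the equivalence is about the return value.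
--     if shape == "pyramid" and base and base[0]:
--         k = h - 1
--         n = len(base)
--         m = len(base[0])
--         out = []
--         for i, row in enumerate(base):
--             if i == k or i == n - 1 - k:
--                 row = [0] * m + row[m:]
--             else:
--                 row = row[:]
--             row[k] = 0
--             row[m - 1 - k] = 0
--             out.append(row)
--         return out
--     return base
-- ===== Notes on version B (the rewrite author's own statement) =====
-- stated objective: alternative
-- what changed: A mutates the grid in place with a doubly-nested loop doing four index writes per (i,j) pair (O(n*m) writes); B instead builds a fresh grid in one pass over enumerate(base), rebuilding each target row wholesale as [0]*m + row[m:] and zeroing the two target columns per row (O(n+m) zero-writes plus the O(n*m) row copies a fresh grid needs). B does not mutate its argument; A does.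
import Mathlib
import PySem

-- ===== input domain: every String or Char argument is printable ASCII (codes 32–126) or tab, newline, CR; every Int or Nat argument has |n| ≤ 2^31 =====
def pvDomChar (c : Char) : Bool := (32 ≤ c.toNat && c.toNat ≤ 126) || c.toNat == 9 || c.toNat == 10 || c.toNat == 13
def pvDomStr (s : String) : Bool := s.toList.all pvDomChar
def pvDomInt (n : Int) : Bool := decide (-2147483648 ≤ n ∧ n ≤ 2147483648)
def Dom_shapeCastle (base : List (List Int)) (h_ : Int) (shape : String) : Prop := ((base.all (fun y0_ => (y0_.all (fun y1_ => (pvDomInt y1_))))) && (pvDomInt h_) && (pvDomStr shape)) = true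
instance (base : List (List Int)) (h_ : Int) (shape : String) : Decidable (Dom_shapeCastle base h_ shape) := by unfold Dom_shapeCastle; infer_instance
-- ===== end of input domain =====

-- B builds and returns a FRESH grid in one pass over enumerate(base): the two target rows
-- are rebuilt wholesale as [0]*m + row[m:], and the two target columns are zeroed in each
-- row; A instead mutates `base` in place inside a doubly-nested loop (four index writes per
-- (i,j) pair).  A mutates its argument, B does not: the equivalence proved here is about
-- the RETURNED value.

-- ===== PORT A =====
-- `g[x][y] = 0` — one Python item assignment (cell write).
def pvSet0 (g : List (List Int)) (x y : Int) : List (List Int) :=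
  PySem.List.pySetD g x (PySem.List.pySetD (PySem.List.pyGetD g x []) y 0)

def shapeCastle (base : List (List Int)) (h_ : Int) (shape : String) : List (List Int) :=
  -- if shape=="rectangular": pass / if shape=="rhombus": pass  — no-ops
  if shape = "pyramid" then
    let k := h_ - 1                                  -- h = h - 1
    let n : Int := (base.length : Int)
    let m : Int := ((base.headD []).length : Int)    -- len(base[0]) (read only when the loops run)
    (PySem.List.pyRange 0 n 1).foldl (fun g i =>
      (PySem.List.pyRange 0 m 1).foldl (fun g j =>
        pvSet0 (pvSet0 (pvSet0 (pvSet0 g k j) (n - 1 - k) j) i k) i (m - 1 - k)) g) base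
  else base

-- ===== PORT B =====
def shapeCastle_alt (base : List (List Int)) (h_ : Int) (shape : String) : List (List Int) :=
  if shape = "pyramid" ∧ base ≠ [] ∧ base.headD [] ≠ [] then
    let k := h_ - 1
    let n : Int := (base.length : Int)
    let m : Nat := (base.headD []).length
    (PySem.List.enumerate base 0).map (fun p =>
      let row := if p.1 = k ∨ p.1 = n - 1 - k
        then List.replicate m 0 ++ p.2.drop m        -- [0]*m + row[m:]  (m = len(base[0]) ≥ 0, so drop is exact)
        else p.2                                     -- row[:] — a copy; the returned value is the same list
      PySem.List.pySetD (PySem.List.pySetD row k 0) ((m : Int) - 1 - k) 0)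
  else base

-- ===== PRECONDITION & SPEC =====
-- Pre_ excludes exactly the inputs on which the Python A raises an IndexError: for shape
-- "pyramid" with a nonempty grid and nonempty first row, every index A writes through
-- (rows h-1 and n-h across the first m columns, and columns h-1 and m-h in every row)
-- must be in range; a negative h-1 always raises via base[n-1-(h-1)] (index ≥ n).
def Pre_shapeCastle (base : List (List Int)) (h_ : Int) (shape : String) : Prop :=
  shape ≠ "pyramid" ∨ base = [] ∨ base.headD [] = [] ∨
  (0 ≤ h_ - 1 ∧ h_ - 1 < (base.length : Int) ∧
   (((base.headD []).length : Int) ≤ ((base.getD (h_ - 1).toNat []).length : Int)) ∧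
   (((base.headD []).length : Int) ≤ ((base.getD (base.length - 1 - (h_ - 1).toNat) []).length : Int)) ∧
   ∀ row ∈ base, h_ - 1 < (row.length : Int) ∧
     -(row.length : Int) ≤ ((base.headD []).length : Int) - 1 - (h_ - 1) ∧
     ((base.headD []).length : Int) - 1 - (h_ - 1) < (row.length : Int))
instance (base : List (List Int)) (h_ : Int) (shape : String) : Decidable (Pre_shapeCastle base h_ shape) := by unfold Pre_shapeCastle; infer_instance

def pvWitness_shapeCastle : List (List Int) × Int × String := ([[1, 2, 3], [4, 5, 6], [7, 8, 9]], 1, "pyramid")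

def Spec_shapeCastle (base : List (List Int)) (h_ : Int) (shape : String) (out : List (List Int)) : Prop := out = shapeCastle_alt base h_ shape
instance (base : List (List Int)) (h_ : Int) (shape : String) (out : List (List Int)) : Decidable (Spec_shapeCastle base h_ shape out) := by unfold Spec_shapeCastle; infer_instance

-- ===== CLAIM (what is proved, stated in full; the proofs are below) =====
def Claim_equal_shapeCastle : Prop := ∀ (base : List (List Int)) (h_ : Int) (shape : String), Dom_shapeCastle base h_ shape → Pre_shapeCastle base h_ shape → Spec_shapeCastle base h_ shape (shapeCastle base h_ shape)

-- ===== LEMMAS AND PROOFS =====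

-- Nat-level cell write: g with g[r][c] := 0 (identity out of range), and a fold of such writes.
def pvW (g : List (List Int)) (p : Nat × Nat) : List (List Int) :=
  g.set p.1 ((g.getD p.1 []).set p.2 0)

def pvApplyW (g : List (List Int)) (ps : List (Nat × Nat)) : List (List Int) :=
  ps.foldl pvW g

theorem pvSet0_eq (g : List (List Int)) (x y : Int) (hx : 0 ≤ x) (hy : 0 ≤ y) :
    pvSet0 g x y = pvW g (x.toNat, y.toNat) := by
  simp [pvSet0, pvW, PySem.List.pySetD_of_nonneg, PySem.List.pyGetD_of_nonneg, hx, hy,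
    List.getD_eq_getElem?_getD]

theorem pvSet0_natCast (g : List (List Int)) (a b : Nat) :
    pvSet0 g (a : Int) (b : Int) = pvW g (a, b) := by
  rw [pvSet0_eq g _ _ (Int.natCast_nonneg a) (Int.natCast_nonneg b)]
  simp

theorem pvSetD0 (l : List Int) (b c : Nat) :
    ((l.set b 0).getD c 0) = if c = b then 0 else l.getD c 0 := by
  by_cases h : c = b
  · subst h
    by_cases hc : c < l.length
    · simp [List.getD_eq_getElem?_getD, hc]
    · have h1 : (l.set c 0)[c]? = none := List.getElem?_eq_none (by simp; omega)
      simp [List.getD_eq_getElem?_getD, h1]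
  · rw [List.getD_eq_getElem?_getD, List.getElem?_set,
      if_neg (show ¬ b = c from fun e => h e.symm), ← List.getD_eq_getElem?_getD, if_neg h]

theorem pvGetDRow (g : List (List Int)) (a r : Nat) (row : List Int) :
    (g.set a row).getD r [] = if r = a ∧ r < g.length then row else g.getD r [] := by
  by_cases hra : r = a
  · subst hra
    by_cases hr : r < g.length
    · simp [List.getD_eq_getElem?_getD, hr]
    · simp [List.getD_eq_getElem?_getD, hr]
  · simp [List.getD_eq_getElem?_getD,
      (show ¬ a = r from fun e => hra e.symm), hra]

theorem pvW_length (g : List (List Int)) (p : Nat × Nat) : (pvW g p).length = g.length := by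
  simp [pvW]

theorem pvW_row_length (g : List (List Int)) (p : Nat × Nat) (r : Nat) :
    ((pvW g p).getD r []).length = (g.getD r []).length := by
  rcases p with ⟨a, b⟩
  show ((g.set a ((g.getD a []).set b 0)).getD r []).length = (g.getD r []).length
  rw [pvGetDRow]
  split_ifs with h
  · rw [List.length_set, h.1]
  · rfl

theorem pvW_cell (g : List (List Int)) (a b r c : Nat) :
    ((pvW g (a, b)).getD r []).getD c 0 =
      if r = a ∧ c = b then 0 else (g.getD r []).getD c 0 := by
  show ((g.set a ((g.getD a []).set b 0)).getD r []).getD c 0 = _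
  rw [pvGetDRow]
  by_cases hra : r = a
  · subst hra
    by_cases hr : r < g.length
    · simp only [hr, and_self, if_true, true_and]
      rw [pvSetD0]
    · have hnil : g.getD r [] = [] := by
        rw [List.getD_eq_getElem?_getD, List.getElem?_eq_none (by omega)]; rfl
      simp only [hr, and_false, if_false, hnil, true_and]
      simp
  · simp [hra]

theorem pvApplyW_length (g : List (List Int)) (ps : List (Nat × Nat)) :
    (pvApplyW g ps).length = g.length := by
  induction ps generalizing g with
  | nil => rfl
  | cons p ps ih =>
    show (pvApplyW (pvW g p) ps).length = g.length
    rw [ih, pvW_length]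

theorem pvApplyW_row_length (g : List (List Int)) (ps : List (Nat × Nat)) (r : Nat) :
    ((pvApplyW g ps).getD r []).length = (g.getD r []).length := by
  induction ps generalizing g with
  | nil => rfl
  | cons p ps ih =>
    show ((pvApplyW (pvW g p) ps).getD r []).length = (g.getD r []).length
    rw [ih, pvW_row_length]

theorem pvApplyW_cell (g : List (List Int)) (ps : List (Nat × Nat)) (r c : Nat) :
    ((pvApplyW g ps).getD r []).getD c 0 =
      if (r, c) ∈ ps then 0 else (g.getD r []).getD c 0 := by
  induction ps generalizing g with
  | nil => simp [pvApplyW]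
  | cons p ps ih =>
    rcases p with ⟨a, b⟩
    show ((pvApplyW (pvW g (a, b)) ps).getD r []).getD c 0 = _
    rw [ih, pvW_cell]
    by_cases h1 : (r, c) ∈ ps
    · simp [h1]
    · by_cases h2 : r = a ∧ c = b
      · simp [h2]
      · simp [h1, h2]

theorem pvApplyW_append (g : List (List Int)) (ps qs : List (Nat × Nat)) :
    pvApplyW g (ps ++ qs) = pvApplyW (pvApplyW g ps) qs := by
  simp [pvApplyW]

theorem foldl_applyW (l : List Nat) (f : Nat → List (Nat × Nat)) (g : List (List Int)) :
    l.foldl (fun g i => pvApplyW g (f i)) g = pvApplyW g (l.flatMap f) := by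
  induction l generalizing g with
  | nil => rfl
  | cons x l ih => simp [List.flatMap_cons, pvApplyW_append, ih]


theorem pvGrid_ext (G1 G2 : List (List Int)) (hlen : G1.length = G2.length)
    (hrow : ∀ r, (G1.getD r []).length = (G2.getD r []).length)
    (hcell : ∀ r c, (G1.getD r []).getD c 0 = (G2.getD r []).getD c 0) : G1 = G2 := by
  apply List.ext_getElem hlen
  intro r h1 h2
  have e1 : G1.getD r [] = G1[r] := by
    rw [List.getD_eq_getElem?_getD, List.getElem?_eq_getElem h1]; rfl
  have e2 : G2.getD r [] = G2[r] := by
    rw [List.getD_eq_getElem?_getD, List.getElem?_eq_getElem h2]; rfl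
  have hrl : (G1[r] : List Int).length = (G2[r] : List Int).length := by
    rw [← e1, ← e2]; exact hrow r
  apply List.ext_getElem hrl
  intro c hc1 hc2
  have hc := hcell r c
  rw [e1, e2, List.getD_eq_getElem?_getD, List.getD_eq_getElem?_getD,
    List.getElem?_eq_getElem hc1, List.getElem?_eq_getElem hc2] at hc
  simpa using hc

theorem foldA_eq (kn nn mm : Nat) (hkn : kn < nn) (hkm : kn < mm) (g : List (List Int)) :
    (PySem.List.pyRange 0 (nn : Int) 1).foldl (fun g i =>
      (PySem.List.pyRange 0 (mm : Int) 1).foldl (fun g j =>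
        pvSet0 (pvSet0 (pvSet0 (pvSet0 g (kn : Int) j) ((nn : Int) - 1 - (kn : Int)) j) i (kn : Int)) i ((mm : Int) - 1 - (kn : Int))) g) g
    = pvApplyW g ((List.range nn).flatMap (fun i => (List.range mm).flatMap (fun j =>
        [(kn, j), (nn - 1 - kn, j), (i, kn), (i, mm - 1 - kn)]))) := by
  have c2 : (nn : Int) - 1 - (kn : Int) = ((nn - 1 - kn : Nat) : Int) := by omega
  have c3 : (mm : Int) - 1 - (kn : Int) = ((mm - 1 - kn : Nat) : Int) := by omega
  rw [c2, c3]
  simp only [PySem.List.pyRange_one, Int.sub_zero, Int.toNat_natCast, List.foldl_map, zero_add]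
  simp only [pvSet0_natCast]
  have h1 : (fun (g : List (List Int)) (i : Nat) =>
      (List.range mm).foldl (fun g j => pvW (pvW (pvW (pvW g (kn, j)) (nn - 1 - kn, j)) (i, kn)) (i, mm - 1 - kn)) g)
      = (fun (g : List (List Int)) (i : Nat) =>
        pvApplyW g ((List.range mm).flatMap (fun j => [(kn, j), (nn - 1 - kn, j), (i, kn), (i, mm - 1 - kn)]))) := by
    funext g i
    exact foldl_applyW (List.range mm) (fun j => [(kn, j), (nn - 1 - kn, j), (i, kn), (i, mm - 1 - kn)]) g
  rw [h1]
  exact foldl_applyW (List.range nn) _ g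

-- ===== B-side lemmas =====

-- [0]*m + row[m:] read at c: 0 below m, the original entry above.
theorem pvReplGetD (row : List Int) (mn c : Nat) :
    (List.replicate mn (0:Int) ++ row.drop mn).getD c 0 = if c < mn then 0 else row.getD c 0 := by
  by_cases h : c < mn
  · rw [List.getD_eq_getElem?_getD, List.getElem?_append_left (by simpa using h)]
    simp [h]
  · rw [List.getD_eq_getElem?_getD, List.getElem?_append_right (by simpa using Nat.le_of_not_lt h)]
    rw [List.length_replicate, List.getElem?_drop, show mn + (c - mn) = c by omega,
      ← List.getD_eq_getElem?_getD, if_neg h]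

theorem pvMapEnumGetD (xs : List (List Int)) (f : Int × List Int → List Int) (r : Nat) :
    ((PySem.List.enumerate xs 0).map f).getD r [] =
      if h : r < xs.length then f ((r : Int), xs[r]) else [] := by
  rw [List.getD_eq_getElem?_getD, List.getElem?_map, PySem.List.getElem?_enumerate]
  by_cases h : r < xs.length
  · simp [h]
  · simp [h]

theorem pvRowF_getD (row : List Int) (kn mn c : Nat) (cond : Prop) [Decidable cond] :
    (((if cond then List.replicate mn (0:Int) ++ row.drop mn else row).set kn 0).set (mn - 1 - kn) 0).getD c 0 =
      if c = mn - 1 - kn ∨ c = kn ∨ (cond ∧ c < mn) then 0 else row.getD c 0 := by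
  rw [pvSetD0, pvSetD0]
  by_cases h1 : c = mn - 1 - kn
  · rw [if_pos h1, if_pos (Or.inl h1)]
  · rw [if_neg h1]
    by_cases h2 : c = kn
    · rw [if_pos h2, if_pos (Or.inr (Or.inl h2))]
    · rw [if_neg h2]
      by_cases hcond : cond
      · rw [if_pos hcond, pvReplGetD]
        by_cases hc : c < mn
        · rw [if_pos hc, if_pos (Or.inr (Or.inr ⟨hcond, hc⟩))]
        · rw [if_neg hc, if_neg (by tauto)]
      · rw [if_neg hcond, if_neg (by tauto)]

theorem pvRowF_len (row : List Int) (kn mn : Nat) (cond : Prop) [Decidable cond]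
    (h : cond → mn ≤ row.length) :
    ((((if cond then List.replicate mn (0:Int) ++ row.drop mn else row).set kn 0).set (mn - 1 - kn) 0)).length = row.length := by
  simp only [List.length_set]
  split_ifs with hc
  · have := h hc; simp; omega
  · rfl

-- ===== VERDICT (by name: the statement is the Claim_ definition above) =====
theorem shapeCastle_spec : Claim_equal_shapeCastle := by
  unfold Claim_equal_shapeCastle
  intro base h_ shape _ hpre
  unfold Spec_shapeCastle
  by_cases hs : shape = "pyramid"
  · subst hs
    rcases hpre with h | hb | hm | hmain
    · exact absurd rfl h
    · subst hb
      simp [shapeCastle, shapeCastle_alt]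
    · simp only [shapeCastle, shapeCastle_alt, hm]
      simp [PySem.List.pyRange_one]
    · obtain ⟨hk0, hklt, hlen1, hlen2, hrows⟩ := hmain
      have hbne : base ≠ [] := by
        intro e; subst e; simp at hklt; omega
      obtain ⟨hd, tl, rfl⟩ := List.exists_cons_of_ne_nil hbne
      simp only [List.headD_cons] at hklt hlen1 hlen2 hrows ⊢
      have hrow0 := hrows hd (by simp)
      have hkm : (h_ - 1) < (hd.length : Int) := hrow0.1
      have hhne : hd ≠ [] := by
        intro e; subst e; simp at hkm; omega
      -- names
      set kn := (h_ - 1).toNat with hkdef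
      have hk : h_ - 1 = ((kn : Nat) : Int) := by omega
      have hknn : kn < (hd :: tl).length := by simp at hklt ⊢; omega
      have hknm : kn < hd.length := by omega
      -- A side: the fold is the application of the write list
      simp only [shapeCastle, shapeCastle_alt, List.headD_cons]
      rw [hk, foldA_eq kn ((hd :: tl).length) hd.length hknn hknm,
        if_pos trivial,
        if_pos (show True ∧ (hd :: tl) ≠ [] ∧ hd ≠ [] from ⟨trivial, by simp, hhne⟩)]
      -- B side and A side compared cell by cell
      apply pvGrid_ext
      · rw [pvApplyW_length]
        simp [PySem.List.length_enumerate]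
      · intro r
        rw [pvApplyW_row_length, pvMapEnumGetD]
        by_cases hr : r < (hd :: tl).length
        · rw [dif_pos hr]
          have hrowmem := hrows ((hd :: tl)[r]) (List.getElem_mem hr)
          have hgd : (hd :: tl).getD r [] = (hd :: tl)[r] := by
            rw [List.getD_eq_getElem?_getD, List.getElem?_eq_getElem hr]; rfl
          rw [hgd]
          -- normalize the two pySetD, the casts, and the if-condition
          have hc3 : ((hd.length : Int) - 1 - (kn : Int)) = ((hd.length - 1 - kn : Nat) : Int) := by omega
          simp only [hc3, PySem.List.pySetD_natCast]
          have hcond : (((r : Nat) : Int) = (kn : Int) ∨ ((r : Nat) : Int) = (((hd :: tl).length : Nat) : Int) - 1 - (kn : Int)) ↔ (r = kn ∨ r = (hd :: tl).length - 1 - kn) := by omega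
          simp only [hcond]
          refine (pvRowF_len _ _ _ _ ?_).symm
          intro hcnd
          rcases hcnd with h | h
          · subst h; rw [← hgd]; exact_mod_cast hlen1
          · subst h; rw [← hgd]; exact_mod_cast hlen2
        · rw [dif_neg hr]
          have hnil : (hd :: tl).getD r [] = [] := by
            rw [List.getD_eq_getElem?_getD, List.getElem?_eq_none (by omega)]; rfl
          rw [hnil]
      · intro r c
        rw [pvApplyW_cell, pvMapEnumGetD]
        by_cases hr : r < (hd :: tl).length
        · rw [dif_pos hr]
          have hgd : (hd :: tl).getD r [] = (hd :: tl)[r] := by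
            rw [List.getD_eq_getElem?_getD, List.getElem?_eq_getElem hr]; rfl
          rw [hgd]
          have hc3 : ((hd.length : Int) - 1 - (kn : Int)) = ((hd.length - 1 - kn : Nat) : Int) := by omega
          simp only [hc3, PySem.List.pySetD_natCast]
          have hcond : (((r : Nat) : Int) = (kn : Int) ∨ ((r : Nat) : Int) = (((hd :: tl).length : Nat) : Int) - 1 - (kn : Int)) ↔ (r = kn ∨ r = (hd :: tl).length - 1 - kn) := by omega
          simp only [hcond]
          rw [pvRowF_getD]
          apply if_congr _ rfl rfl
          have hn0 : 0 < (hd :: tl).length := by simp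
          have hm0 : 0 < hd.length := by omega
          simp only [List.mem_flatMap, List.mem_range, List.mem_cons,
            List.not_mem_nil, or_false, Prod.mk.injEq]
          constructor
          · rintro ⟨i, hi, j, hj, hcase⟩
            rcases hcase with ⟨e1, e2⟩ | ⟨e1, e2⟩ | ⟨e1, e2⟩ | ⟨e1, e2⟩
            · exact Or.inr (Or.inr ⟨Or.inl e1, e2 ▸ hj⟩)
            · exact Or.inr (Or.inr ⟨Or.inr e1, e2 ▸ hj⟩)
            · exact Or.inr (Or.inl e2)
            · exact Or.inl e2
          · rintro (h | h | ⟨h, hcm⟩)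
            · exact ⟨r, hr, 0, hm0, Or.inr (Or.inr (Or.inr ⟨rfl, h⟩))⟩
            · exact ⟨r, hr, 0, hm0, Or.inr (Or.inr (Or.inl ⟨rfl, h⟩))⟩
            · rcases h with h | h
              · exact ⟨0, hn0, c, hcm, Or.inl ⟨h, rfl⟩⟩
              · exact ⟨0, hn0, c, hcm, Or.inr (Or.inl ⟨h, rfl⟩)⟩
        · rw [dif_neg hr]
          have hnil : (hd :: tl).getD r [] = [] := by
            rw [List.getD_eq_getElem?_getD, List.getElem?_eq_none (by omega)]; rfl
          rw [hnil]
          simp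
  · simp [shapeCastle, shapeCastle_alt, hs]
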